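-- pv_equiv track=rewrite | github.com/coingraham/adventofcode | 2018/day2.py | get_repeating_letters
-- ===== SOURCE A (Python) =====
-- def get_repeating_letters(id):
--     has_two = False
--     has_three = False
--
--     letter_list = list(id)
--     seen_letters = []
--
--     for letter in letter_list:
--         if letter in seen_letters:
--             continue
--         if letter_list.count(letter) == 2:
--             has_two = True
--         elif letter_list.count(letter) == 3:
--             has_three = True
--         seen_letters.append(letter)
--
--     return [has_two, has_three]
-- ===== SOURCE B (Python) =====
-- def get_repeating_letters(id):
--     s = sorted(id)
--     has_two = False
--     has_three = False
--     i = 0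
--     n = len(s)
--     while i < n:
--         j = i + 1
--         while j < n and s[j] == s[i]:
--             j += 1
--         run = j - i
--         if run == 2:
--             has_two = True
--         elif run == 3:
--             has_three = True
--         i = j
--     return [has_two, has_three]
-- ===== Notes on version B (the rewrite author's own statement) =====
-- stated objective: alternative
-- what changed: Replaces the seen-list membership checks and repeated full-list .count scans with a single sort followed by one run-length scan over the sorted characters.
import Mathlib
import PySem

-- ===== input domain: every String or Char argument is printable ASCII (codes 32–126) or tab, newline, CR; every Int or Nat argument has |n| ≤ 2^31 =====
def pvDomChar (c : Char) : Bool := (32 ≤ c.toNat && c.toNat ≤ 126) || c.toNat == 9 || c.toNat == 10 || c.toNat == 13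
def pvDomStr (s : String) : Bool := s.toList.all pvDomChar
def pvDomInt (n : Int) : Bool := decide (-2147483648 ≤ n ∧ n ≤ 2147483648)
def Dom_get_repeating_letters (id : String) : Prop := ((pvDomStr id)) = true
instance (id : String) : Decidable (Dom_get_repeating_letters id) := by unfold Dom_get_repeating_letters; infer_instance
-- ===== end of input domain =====

-- B replaces A's seen-list plus repeated full-list .count scans by one sort and one run-length scan (a different algorithm of similar measured cost).

-- ===== PORT A =====
-- one loop step of A: skip seen letters, else set a flag from the full-list count and record the letter
def aStep (letter_list : List Char) (st : Bool × Bool × List Char) (letter : Char) : Bool × Bool × List Char :=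
  match st with
  | (has_two, has_three, seen) =>
    if letter ∈ seen then st
    else if letter_list.count letter = 2 then (true, has_three, seen ++ [letter])
    else if letter_list.count letter = 3 then (has_two, true, seen ++ [letter])
    else (has_two, has_three, seen ++ [letter])

def get_repeating_letters (id : String) : List Bool :=
  let letter_list := id.toList
  let st := letter_list.foldl (aStep letter_list) (false, false, [])
  [st.1, st.2.1]

-- ===== PORT B =====
-- outer while loop of B: each step consumes one maximal run of equal characters (inner while = takeWhile/dropWhile)
def bScan (s : List Char) (has_two has_three : Bool) : Bool × Bool :=
  match s with
  | [] => (has_two, has_three)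
  | c :: rest =>
    let run := 1 + (rest.takeWhile (fun d => d == c)).length
    let rest' := rest.dropWhile (fun d => d == c)
    if run = 2 then bScan rest' true has_three
    else if run = 3 then bScan rest' has_two true
    else bScan rest' has_two has_three
termination_by s.length
decreasing_by all_goals
  simp only [List.length_cons]
  exact Nat.lt_succ_of_le (List.length_dropWhile_le _ _)

def get_repeating_letters_alt (id : String) : List Bool :=
  let s := PySem.List.sorted id.toList (fun c => c) false
  let st := bScan s false false
  [st.1, st.2]

-- ===== PRECONDITION & SPEC =====
def Spec_get_repeating_letters (id : String) (out : List Bool) : Prop := out = get_repeating_letters_alt id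
instance (id : String) (out : List Bool) : Decidable (Spec_get_repeating_letters id out) := by unfold Spec_get_repeating_letters; infer_instance

-- ===== CLAIM (what is proved, stated in full; the proofs are below) =====
def Claim_equal_get_repeating_letters : Prop := ∀ (id : String), Dom_get_repeating_letters id → Spec_get_repeating_letters id (get_repeating_letters id)

-- ===== LEMMAS AND PROOFS =====

-- pointwise-equal predicates give equal `any`
theorem any_congr_mem (l : List Char) (f g : Char → Bool) (h : ∀ c ∈ l, f c = g c) :
    l.any f = l.any g := by
  induction l with
  | nil => rfl
  | cons c t ih => simp_all [List.any_cons]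

-- growing the seen list by a letter whose count is not k does not change A's flag-k scan
theorem predShift (l seen : List Char) (c : Char) (k : Nat) (hk : ¬ l.count c = k) (r : List Char) :
    r.any (fun d => decide (d ∉ seen ++ [c]) && decide (l.count d = k))
      = r.any (fun d => decide (d ∉ seen) && decide (l.count d = k)) := by
  apply any_congr_mem
  intro d _
  by_cases hd : d = c
  · subst hd; simp [hk]
  · simp [List.mem_append, hd]

-- in a sorted list, c does not reappear after its initial run is dropped
theorem not_mem_dropWhile_sorted (c : Char) : ∀ (rest : List Char),
    List.Pairwise (fun a b => a ≤ b) rest → (∀ x ∈ rest, c ≤ x) →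
    c ∉ rest.dropWhile (fun d => d == c) := by
  intro rest
  induction rest with
  | nil => simp
  | cons h tl ih =>
    intro hp hle
    by_cases hh : (h == c) = true
    · rw [List.dropWhile_cons, if_pos hh]
      exact ih (List.pairwise_cons.mp hp).2 (fun x hx => hle x (by simp [hx]))
    · rw [List.dropWhile_cons, if_neg hh]
      intro hmem
      rcases List.mem_cons.mp hmem with h1 | h1
      · exact hh (by simp [h1])
      · have h1le : h ≤ c := (List.pairwise_cons.mp hp).1 c h1
        have h2le : c ≤ h := hle h (by simp)
        exact hh (by simp [le_antisymm h1le h2le])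

-- A's fold sets flag k exactly when some not-yet-seen letter has full-list count k
theorem aInv (l : List Char) : ∀ (r : List Char) (h2 h3 : Bool) (seen : List Char),
    ((r.foldl (aStep l) (h2, h3, seen)).1, (r.foldl (aStep l) (h2, h3, seen)).2.1)
      = (h2 || r.any (fun c => decide (c ∉ seen) && decide (l.count c = 2)),
         h3 || r.any (fun c => decide (c ∉ seen) && decide (l.count c = 3))) := by
  intro r
  induction r with
  | nil => intro h2 h3 seen; simp
  | cons c r ih =>
    intro h2 h3 seen
    simp only [List.foldl_cons, List.any_cons]
    by_cases hc : c ∈ seen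
    · rw [show aStep l (h2, h3, seen) c = (h2, h3, seen) from by simp [aStep, hc]]
      rw [ih]
      simp [hc]
    · by_cases h2c : l.count c = 2
      · rw [show aStep l (h2, h3, seen) c = (true, h3, seen ++ [c]) from by
          simp [aStep, hc, h2c]]
        rw [ih]
        have h3c : ¬ l.count c = 3 := by omega
        rw [predShift l seen c 3 h3c]
        simp [hc, h2c]
      · by_cases h3c : l.count c = 3
        · rw [show aStep l (h2, h3, seen) c = (h2, true, seen ++ [c]) from by
            simp [aStep, hc, h3c]]
          rw [ih]
          rw [predShift l seen c 2 h2c]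
          simp [hc, h3c]
        · rw [show aStep l (h2, h3, seen) c = (h2, h3, seen ++ [c]) from by
            simp [aStep, hc, h2c, h3c]]
          rw [ih]
          rw [predShift l seen c 2 h2c, predShift l seen c 3 h3c]
          simp [h2c, h3c]

-- B's scan on a sorted list sets flag k exactly when some letter has count k in that list
theorem bInv : ∀ (n : Nat) (s : List Char), s.length ≤ n → s.Pairwise (fun a b => a ≤ b) →
    ∀ (h2 h3 : Bool), bScan s h2 h3
      = (h2 || s.any (fun c => decide (s.count c = 2)),
         h3 || s.any (fun c => decide (s.count c = 3))) := by
  intro n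
  induction n with
  | zero =>
    intro s hlen _ h2 h3
    have hs : s = [] := List.eq_nil_of_length_eq_zero (Nat.le_zero.mp hlen)
    subst hs; simp [bScan]
  | succ n ih =>
    intro s hlen hsort h2 h3
    match s with
    | [] => simp [bScan]
    | c :: rest =>
      have hrest : List.Pairwise (fun a b => a ≤ b) rest := (List.pairwise_cons.mp hsort).2
      have hcle : ∀ x ∈ rest, c ≤ x := (List.pairwise_cons.mp hsort).1
      have htd : rest = rest.takeWhile (fun d => d == c) ++ rest.dropWhile (fun d => d == c) :=
        (List.takeWhile_append_dropWhile).symm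
      have ht : ∀ x ∈ rest.takeWhile (fun d => d == c), x = c := by
        intro x hx
        have := List.mem_takeWhile_imp hx
        simpa using this
      have hdsub : (rest.dropWhile (fun d => d == c)).Sublist rest := List.dropWhile_sublist _
      have hdsort : List.Pairwise (fun a b => a ≤ b) (rest.dropWhile (fun d => d == c)) :=
        hrest.sublist hdsub
      have hcd : c ∉ rest.dropWhile (fun d => d == c) :=
        not_mem_dropWhile_sorted c rest hrest hcle
      have hct : (rest.takeWhile (fun d => d == c)).count c
          = (rest.takeWhile (fun d => d == c)).length :=
        List.count_eq_length.mpr (fun b hb => (ht b hb).symm)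
      have hcd0 : (rest.dropWhile (fun d => d == c)).count c = 0 := List.count_eq_zero.mpr hcd
      have hcnt : (c :: rest).count c = 1 + (rest.takeWhile (fun d => d == c)).length := by
        rw [List.count_cons_self]
        conv_lhs => rw [htd]
        rw [List.count_append, hct, hcd0]
        omega
      have hcnt_d : ∀ e ∈ rest.dropWhile (fun d => d == c),
          (c :: rest).count e = (rest.dropWhile (fun d => d == c)).count e := by
        intro e he
        have hec : e ≠ c := fun h => hcd (h ▸ he)
        have het : (rest.takeWhile (fun d => d == c)).count e = 0 :=
          List.count_eq_zero.mpr (fun hmem => hec (ht e hmem))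
        rw [List.count_cons]
        conv_lhs => rw [htd]
        rw [List.count_append, het]
        simp [Ne.symm hec]
      have hdlen : (rest.dropWhile (fun d => d == c)).length ≤ n := by
        have ha : (rest.dropWhile (fun d => d == c)).length ≤ rest.length := hdsub.length_le
        have hb : rest.length ≤ n := by simpa using Nat.succ_le_succ_iff.mp (by simpa using hlen)
        omega
      have hIH := ih (rest.dropWhile (fun d => d == c)) hdlen hdsort
      have hany : ∀ k : Nat, (c :: rest).any (fun e => decide ((c :: rest).count e = k))
          = (decide ((c :: rest).count c = k)
             || (rest.dropWhile (fun d => d == c)).any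
                  (fun e => decide ((rest.dropWhile (fun d => d == c)).count e = k))) := by
        intro k
        rw [Bool.eq_iff_iff]
        simp only [List.any_eq_true, decide_eq_true_eq, Bool.or_eq_true, List.mem_cons]
        constructor
        · rintro ⟨e, he, hk⟩
          rcases he with rfl | he
          · exact Or.inl hk
          · rcases List.mem_append.mp (htd ▸ he) with h1 | h1
            · exact Or.inl (by rw [ht e h1] at hk; exact hk)
            · exact Or.inr ⟨e, h1, by rw [← hcnt_d e h1]; exact hk⟩
        · rintro (hk | ⟨e, he, hk⟩)
          · exact ⟨c, Or.inl rfl, hk⟩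
          · exact ⟨e, Or.inr (hdsub.subset he), by rw [hcnt_d e he]; exact hk⟩
      rw [show bScan (c :: rest) h2 h3
            = (if 1 + (rest.takeWhile (fun d => d == c)).length = 2
                 then bScan (rest.dropWhile (fun d => d == c)) true h3
               else if 1 + (rest.takeWhile (fun d => d == c)).length = 3
                 then bScan (rest.dropWhile (fun d => d == c)) h2 true
               else bScan (rest.dropWhile (fun d => d == c)) h2 h3) from by rw [bScan]]
      by_cases hr2 : 1 + (rest.takeWhile (fun d => d == c)).length = 2
      · rw [if_pos hr2, hIH]
        have hc2 : (c :: rest).count c = 2 := by omega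
        have hc3 : ¬ (c :: rest).count c = 3 := by omega
        rw [hany 2, hany 3, decide_eq_true hc2, decide_eq_false hc3]
        simp
      · rw [if_neg hr2]
        by_cases hr3 : 1 + (rest.takeWhile (fun d => d == c)).length = 3
        · rw [if_pos hr3, hIH]
          have hc2 : ¬ (c :: rest).count c = 2 := by omega
          have hc3 : (c :: rest).count c = 3 := by omega
          rw [hany 2, hany 3, decide_eq_false hc2, decide_eq_true hc3]
          simp
        · rw [if_neg hr3, hIH]
          have hc2 : ¬ (c :: rest).count c = 2 := by omega
          have hc3 : ¬ (c :: rest).count c = 3 := by omega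
          rw [hany 2, hany 3, decide_eq_false hc2, decide_eq_false hc3]
          simp

-- ===== VERDICT (by name: the statement is the Claim_ definition above) =====
theorem get_repeating_letters_spec : Claim_equal_get_repeating_letters := by
  intro id _
  unfold Spec_get_repeating_letters get_repeating_letters get_repeating_letters_alt
  set l := id.toList with hl
  set s := PySem.List.sorted l (fun c => c) false with hs
  have hperm : s.Perm l := PySem.List.sorted_perm l (fun c => c) false
  have hsort : s.Pairwise (fun a b => a ≤ b) := PySem.List.sorted_pairwise l (fun c => c)
  have hA := aInv l l false false []
  have hB := bInv s.length s le_rfl hsort false false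
  have hany : ∀ k : Nat, (l.any (fun c => decide (l.count c = k))
      = s.any (fun c => decide (s.count c = k))) := by
    intro k
    rw [List.Perm.any_eq hperm.symm]
    apply any_congr_mem
    intro c _
    rw [hperm.count_eq c]
  have hA1 := congrArg Prod.fst hA
  have hA2 := congrArg Prod.snd hA
  simp only [List.not_mem_nil, not_false_iff, decide_true, Bool.true_and, Bool.false_or] at hA1 hA2 hB
  simp only [List.cons.injEq, and_true]
  rw [hA1, hA2, hB, hany 2, hany 3]
  exact ⟨rfl, rfl⟩
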